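-- pv_equiv track=rewrite | github.com/yamaceay/dp | experiments/utility/tab_country_year.py | group_country
-- ===== SOURCE A (Python) =====
-- from typing import Callable, Iterable, Optional
--
-- REGION_GROUPS = {
--     "northern_europe": {"DNK", "NOR", "SWE", "FIN", "ISL"},
--     "western_europe": {"FRA", "DEU", "BEL", "NLD", "GBR", "IRL", "LUX", "CHE", "AUT"},
--     "southern_europe": {"ESP", "PRT", "ITA", "GRC", "MLT", "CYP", "SMR", "AND"},
--     "central_europe": {"POL", "CZE", "SVK", "HUN", "SVN"},
--     "baltic": {"EST", "LVA", "LTU"},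
--     "eastern_europe": {"RUS", "UKR", "BLR", "MDA"},
--     "balkans": {"ROU", "BGR", "SRB", "HRV", "BIH", "MKD", "MNE", "ALB", "KSV"},
--     "caucasus": {"ARM", "AZE", "GEO"},
--     "middle_east": {"TUR"},
-- }
--
-- def group_country(value: Optional[str]) -> Optional[str]:
--     if value is None:
--         return None
--     key = value.upper()
--     for region, codes in REGION_GROUPS.items():
--         if key in codes:
--             return region
--     return "other"
-- ===== SOURCE B (Python) =====
-- from typing import Optional
--
-- # Flat inverted index: country code -> region, written out once; no per-call scan.
-- COUNTRY_TO_REGION = {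
--     "DNK": "northern_europe",
--     "NOR": "northern_europe",
--     "SWE": "northern_europe",
--     "FIN": "northern_europe",
--     "ISL": "northern_europe",
--     "FRA": "western_europe",
--     "DEU": "western_europe",
--     "BEL": "western_europe",
--     "NLD": "western_europe",
--     "GBR": "western_europe",
--     "IRL": "western_europe",
--     "LUX": "western_europe",
--     "CHE": "western_europe",
--     "AUT": "western_europe",
--     "ESP": "southern_europe",
--     "PRT": "southern_europe",
--     "ITA": "southern_europe",
--     "GRC": "southern_europe",
--     "MLT": "southern_europe",
--     "CYP": "southern_europe",
--     "SMR": "southern_europe",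
--     "AND": "southern_europe",
--     "POL": "central_europe",
--     "CZE": "central_europe",
--     "SVK": "central_europe",
--     "HUN": "central_europe",
--     "SVN": "central_europe",
--     "EST": "baltic",
--     "LVA": "baltic",
--     "LTU": "baltic",
--     "RUS": "eastern_europe",
--     "UKR": "eastern_europe",
--     "BLR": "eastern_europe",
--     "MDA": "eastern_europe",
--     "ROU": "balkans",
--     "BGR": "balkans",
--     "SRB": "balkans",
--     "HRV": "balkans",
--     "BIH": "balkans",
--     "MKD": "balkans",
--     "MNE": "balkans",
--     "ALB": "balkans",
--     "KSV": "balkans",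
--     "ARM": "caucasus",
--     "AZE": "caucasus",
--     "GEO": "caucasus",
--     "TUR": "middle_east"
-- }
--
--
-- def group_country(value: Optional[str]) -> Optional[str]:
--     if value is None:
--         return None
--     return COUNTRY_TO_REGION.get(value.upper(), "other")
-- ===== Notes on version B (the rewrite author's own statement) =====
-- stated objective: idiomatic
-- what changed: The per-call for-loop over REGION_GROUPS with set membership tests is gone: B ships a flat literal inverted index COUNTRY_TO_REGION (code -> region) and group_country is a single dict .get with default.
import Mathlib
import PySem

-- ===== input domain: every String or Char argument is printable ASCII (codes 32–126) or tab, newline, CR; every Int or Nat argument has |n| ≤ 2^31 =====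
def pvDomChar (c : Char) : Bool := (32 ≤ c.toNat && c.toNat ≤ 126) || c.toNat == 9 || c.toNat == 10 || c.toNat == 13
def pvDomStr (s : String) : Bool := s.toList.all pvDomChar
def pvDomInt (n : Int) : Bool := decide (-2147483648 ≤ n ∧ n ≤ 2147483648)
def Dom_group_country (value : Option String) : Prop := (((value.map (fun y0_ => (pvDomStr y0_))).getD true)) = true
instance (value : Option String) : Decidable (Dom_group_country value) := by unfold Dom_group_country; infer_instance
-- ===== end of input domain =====

-- B replaces A's per-call loop over the region groups by a flat literal inverted
-- index (code -> region) and a single dict lookup with default "other" (idiomatic).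

-- ===== PORT A =====
-- REGION_GROUPS: dict region -> set of codes, insertion order
def REGION_GROUPS : List (String × PySem.Set String) :=
  [("northern_europe", PySem.Set.ofList ["DNK","NOR","SWE","FIN","ISL"]),
   ("western_europe", PySem.Set.ofList ["FRA","DEU","BEL","NLD","GBR","IRL","LUX","CHE","AUT"]),
   ("southern_europe", PySem.Set.ofList ["ESP","PRT","ITA","GRC","MLT","CYP","SMR","AND"]),
   ("central_europe", PySem.Set.ofList ["POL","CZE","SVK","HUN","SVN"]),
   ("baltic", PySem.Set.ofList ["EST","LVA","LTU"]),
   ("eastern_europe", PySem.Set.ofList ["RUS","UKR","BLR","MDA"]),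
   ("balkans", PySem.Set.ofList ["ROU","BGR","SRB","HRV","BIH","MKD","MNE","ALB","KSV"]),
   ("caucasus", PySem.Set.ofList ["ARM","AZE","GEO"]),
   ("middle_east", PySem.Set.ofList ["TUR"])]

-- the 'for region, codes in REGION_GROUPS.items(): if key in codes: return region' loop
def scanGroups : List (String × PySem.Set String) → String → Option String
  | [], _ => some "other"
  | (region, codes) :: rest, key =>
      if key ∈ codes then some region else scanGroups rest key

def group_country (value : Option String) : Option String :=
  match value with
  | none => none
  | some v => scanGroups REGION_GROUPS (PySem.Str.upper v)

-- ===== PORT B =====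
-- the flat literal dict COUNTRY_TO_REGION of Source B (distinct keys, insertion order)
def COUNTRY_TO_REGION : PySem.Dict String String :=
  PySem.Dict.ofList
    [("DNK","northern_europe"),("NOR","northern_europe"),("SWE","northern_europe"),
     ("FIN","northern_europe"),("ISL","northern_europe"),
     ("FRA","western_europe"),("DEU","western_europe"),("BEL","western_europe"),
     ("NLD","western_europe"),("GBR","western_europe"),("IRL","western_europe"),
     ("LUX","western_europe"),("CHE","western_europe"),("AUT","western_europe"),
     ("ESP","southern_europe"),("PRT","southern_europe"),("ITA","southern_europe"),
     ("GRC","southern_europe"),("MLT","southern_europe"),("CYP","southern_europe"),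
     ("SMR","southern_europe"),("AND","southern_europe"),
     ("POL","central_europe"),("CZE","central_europe"),("SVK","central_europe"),
     ("HUN","central_europe"),("SVN","central_europe"),
     ("EST","baltic"),("LVA","baltic"),("LTU","baltic"),
     ("RUS","eastern_europe"),("UKR","eastern_europe"),("BLR","eastern_europe"),
     ("MDA","eastern_europe"),
     ("ROU","balkans"),("BGR","balkans"),("SRB","balkans"),("HRV","balkans"),
     ("BIH","balkans"),("MKD","balkans"),("MNE","balkans"),("ALB","balkans"),
     ("KSV","balkans"),
     ("ARM","caucasus"),("AZE","caucasus"),("GEO","caucasus"),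
     ("TUR","middle_east")]

def group_country_alt (value : Option String) : Option String :=
  match value with
  | none => none
  | some v => some (COUNTRY_TO_REGION.getD (PySem.Str.upper v) "other")

-- ===== PRECONDITION & SPEC =====
def Spec_group_country (value : Option String) (out : Option String) : Prop := out = group_country_alt value
instance (value : Option String) (out : Option String) : Decidable (Spec_group_country value out) := by unfold Spec_group_country; infer_instance

-- ===== CLAIM (what is proved, stated in full; the proofs are below) =====
def Claim_equal_group_country : Prop := ∀ (value : Option String), Dom_group_country value → Spec_group_country value (group_country value)

-- ===== LEMMAS AND PROOFS =====
-- the flat (code, region) pairs of the groups, in scan order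
def flatPairs (gs : List (String × PySem.Set String)) : List (String × String) :=
  gs.flatMap (fun p => (p.2 : List String).map (fun c => (c, p.1)))

-- first-match lookup in a block of pairs all mapped to r, then the rest
theorem get?_mk_block (cs : List String) (r : String) (l : List (String × String)) (k : String) :
    (PySem.Dict.mk ((cs.map (fun c => (c, r))) ++ l)).get? k
      = if k ∈ cs then some r else (PySem.Dict.mk l).get? k := by
  induction cs with
  | nil => simp
  | cons c cs ih =>
      simp only [List.map_cons, List.cons_append, PySem.Dict.get?_mk_cons, ih, List.mem_cons]
      by_cases h : c = k <;> simp [h] <;> split_ifs <;> simp_all [eq_comm]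

-- A's scan over the groups equals first-match lookup in the flattened pairs
theorem scan_eq_flat (gs : List (String × PySem.Set String)) (k : String) :
    scanGroups gs k = some ((PySem.Dict.mk (flatPairs gs)).getD k "other") := by
  induction gs with
  | nil => simp [scanGroups, flatPairs, PySem.Dict.getD_eq_get?_getD, PySem.Dict.get?]
  | cons p rest ih =>
      obtain ⟨r, cs⟩ := p
      simp only [scanGroups, flatPairs, List.flatMap_cons, PySem.Dict.getD_eq_get?_getD,
        get?_mk_block]
      by_cases h : k ∈ (cs : List String)
      · simp [h]
      · simpa [h, PySem.Dict.getD_eq_get?_getD, flatPairs] using ih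

-- the literal index of Source B is exactly the flattened groups
set_option maxRecDepth 4000 in
theorem index_eq_flat : COUNTRY_TO_REGION = PySem.Dict.mk (flatPairs REGION_GROUPS) := by
  decide

-- ===== VERDICT (by name: the statement is the Claim_ definition above) =====
theorem group_country_spec : Claim_equal_group_country := by
  intro value _
  unfold Spec_group_country
  match value with
  | none => rfl
  | some v =>
    simp only [group_country, group_country_alt, index_eq_flat]
    exact scan_eq_flat REGION_GROUPS (PySem.Str.upper v)
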